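-- pv_equiv track=rewrite | github.com/Chris-Lehnen-ICT-CONSULTING/Definitie-app-zakelijk | src/hybrid_context/smart_source_selector.py | _extract_keyword_themes
-- ===== SOURCE A (Python) =====
-- def _extract_keyword_themes(keywords: list[str]) -> list[str]:
--     """Extraheer thematische groepen uit keywords."""
--     themes = []
--
--     # Process themes
--     if any("proces" in kw.lower() or "procedure" in kw.lower() for kw in keywords):
--         themes.append("process")
--
--     # Technology themes
--     if any("systeem" in kw.lower() or "digitaal" in kw.lower() for kw in keywords):
--         themes.append("technology")
--
--     # Legal themes
--     if any("wet" in kw.lower() or "juridisch" in kw.lower() for kw in keywords):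
--         themes.append("legal")
--
--     # Security themes
--     if any(
--         "beveiliging" in kw.lower() or "veiligheid" in kw.lower() for kw in keywords
--     ):
--         themes.append("security")
--
--     return themes
-- ===== SOURCE B (Python) =====
-- _THEMES = [
--     ("process", ("proces", "procedure")),
--     ("technology", ("systeem", "digitaal")),
--     ("legal", ("wet", "juridisch")),
--     ("security", ("beveiliging", "veiligheid")),
-- ]
--
--
-- def _extract_keyword_themes(keywords: list[str]) -> list[str]:
--     """Single pass over keywords: lowercase each keyword once, collect the
--     matched theme labels in a set, then emit them in the table's fixed order."""
--     found = set()
--     for kw in keywords: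
--         kw_l = kw.lower()
--         for label, subs in _THEMES:
--             if any(s in kw_l for s in subs):
--                 found.add(label)
--     return [label for label, _ in _THEMES if label in found]
-- ===== Notes on version B (the rewrite author's own statement) =====
-- stated objective: simpler
-- what changed: Replaced the four hard-coded any()-scans (each lowercasing every keyword twice) with a data-driven theme table and one pass over the keywords that lowercases each keyword once and collects matched labels in a set, emitted in the table's fixed order.
import Mathlib
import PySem

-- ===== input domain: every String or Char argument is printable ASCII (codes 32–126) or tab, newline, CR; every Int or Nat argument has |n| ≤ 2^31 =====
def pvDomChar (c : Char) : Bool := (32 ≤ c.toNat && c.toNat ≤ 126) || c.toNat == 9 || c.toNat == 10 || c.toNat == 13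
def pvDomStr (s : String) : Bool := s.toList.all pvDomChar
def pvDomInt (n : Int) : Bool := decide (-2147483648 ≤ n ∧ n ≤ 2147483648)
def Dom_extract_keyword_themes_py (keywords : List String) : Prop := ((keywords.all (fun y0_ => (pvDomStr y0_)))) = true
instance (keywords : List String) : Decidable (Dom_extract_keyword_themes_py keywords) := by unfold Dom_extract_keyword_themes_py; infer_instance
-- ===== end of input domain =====

-- B replaces A's four hard-coded any()-scans by a data-driven theme table and a single pass
-- over the keywords (each lowercased once) collecting found labels in a set; objective: simpler.

-- ===== PORT A =====
def extract_keyword_themes_py (keywords : List String) : List String :=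
  let themes : List String := []
  let themes := if keywords.any (fun kw =>
      PySem.Str.isIn "proces" (PySem.Str.lower kw) || PySem.Str.isIn "procedure" (PySem.Str.lower kw))
    then themes ++ ["process"] else themes
  let themes := if keywords.any (fun kw =>
      PySem.Str.isIn "systeem" (PySem.Str.lower kw) || PySem.Str.isIn "digitaal" (PySem.Str.lower kw))
    then themes ++ ["technology"] else themes
  let themes := if keywords.any (fun kw =>
      PySem.Str.isIn "wet" (PySem.Str.lower kw) || PySem.Str.isIn "juridisch" (PySem.Str.lower kw))
    then themes ++ ["legal"] else themes
  let themes := if keywords.any (fun kw =>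
      PySem.Str.isIn "beveiliging" (PySem.Str.lower kw) || PySem.Str.isIn "veiligheid" (PySem.Str.lower kw))
    then themes ++ ["security"] else themes
  themes

-- ===== PORT B =====
def pvThemeTable : List (String × List String) :=
  [("process", ["proces", "procedure"]),
   ("technology", ["systeem", "digitaal"]),
   ("legal", ["wet", "juridisch"]),
   ("security", ["beveiliging", "veiligheid"])]

def extract_keyword_themes_py_alt (keywords : List String) : List String :=
  let found : PySem.Set String := keywords.foldl (fun found kw =>
    let kw_l := PySem.Str.lower kw
    pvThemeTable.foldl (fun found p =>
      if p.2.any (fun s => PySem.Str.isIn s kw_l) then found.add p.1 else found) found)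
    PySem.Set.empty
  (pvThemeTable.map Prod.fst).filter (fun label => found.contains label)

-- ===== PRECONDITION & SPEC =====
def Spec_extract_keyword_themes_py (keywords : List String) (out : List String) : Prop := out = extract_keyword_themes_py_alt keywords
instance (keywords : List String) (out : List String) : Decidable (Spec_extract_keyword_themes_py keywords out) := by unfold Spec_extract_keyword_themes_py; infer_instance

-- ===== CLAIM (what is proved, stated in full; the proofs are below) =====
def Claim_equal_extract_keyword_themes_py : Prop := ∀ (keywords : List String), Dom_extract_keyword_themes_py keywords → Spec_extract_keyword_themes_py keywords (extract_keyword_themes_py keywords)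

-- ===== LEMMAS AND PROOFS =====

theorem pv_contains_add (s : PySem.Set String) (y x : String) :
    (s.add y).contains x = (s.contains x || x == y) := by
  rw [PySem.Set.add_eq_ite]
  split
  · next h =>
    cases hx : x == y
    · simp
    · have hxy : x = y := by simpa using hx
      subst hxy
      simp [h]
  · simp only [PySem.Set.contains_eq_listContains]
    simp only [List.contains_eq_mem, List.mem_append, List.mem_singleton]
    by_cases h1 : x ∈ s <;> by_cases h2 : x = y <;> simp [h1, h2]

-- membership through a conditional add
theorem pv_contains_condAdd (b : Bool) (s : PySem.Set String) (y x : String) :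
    (if b then s.add y else s).contains x = (s.contains x || (b && x == y)) := by
  cases b
  · simp
  · simpa using pv_contains_add s y x

-- label membership after processing one keyword (the inner fold over the literal table)
set_option maxHeartbeats 1000000 in
theorem pv_step_contains (found : PySem.Set String) (kw x : String) :
    (pvThemeTable.foldl (fun found (p : String × List String) =>
        if p.2.any (fun s => PySem.Str.isIn s (PySem.Str.lower kw)) then found.add p.1 else found)
      found).contains x
    = (found.contains x ||
       pvThemeTable.any (fun p => p.1 == x && p.2.any (fun s => PySem.Str.isIn s (PySem.Str.lower kw)))) := by
  simp only [pvThemeTable, List.foldl_cons, List.foldl_nil, List.any_cons, List.any_nil,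
    pv_contains_condAdd]
  rw [Bool.eq_iff_iff]
  simp only [Bool.or_false, Bool.or_eq_true, Bool.and_eq_true, beq_iff_eq, @eq_comm String x]
  by_cases h1 : "process" = x <;> by_cases h2 : "technology" = x <;>
    by_cases h3 : "legal" = x <;> by_cases h4 : "security" = x <;>
    simp_all <;> tauto

-- label membership after the whole outer fold
theorem pv_fold_contains (keywords : List String) (found : PySem.Set String) (x : String) :
    (keywords.foldl (fun found kw =>
        pvThemeTable.foldl (fun found (p : String × List String) =>
          if p.2.any (fun s => PySem.Str.isIn s (PySem.Str.lower kw)) then found.add p.1 else found)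
        found) found).contains x
    = (found.contains x ||
       keywords.any (fun kw =>
         pvThemeTable.any (fun p => p.1 == x && p.2.any (fun s => PySem.Str.isIn s (PySem.Str.lower kw))))) := by
  induction keywords generalizing found with
  | nil => simp
  | cons kw rest ih =>
    simp only [List.foldl_cons, List.any_cons, ih]
    rw [pv_step_contains, Bool.or_assoc]

-- ===== VERDICT (by name: the statement is the Claim_ definition above) =====
theorem extract_keyword_themes_py_spec : Claim_equal_extract_keyword_themes_py := by
  intro keywords _
  unfold Spec_extract_keyword_themes_py extract_keyword_themes_py extract_keyword_themes_py_alt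
  simp only [pv_fold_contains]
  simp only [pvThemeTable, List.map_cons, List.map_nil, List.filter_cons,
    List.filter_nil, List.any_cons, List.any_nil, Bool.or_false]
  simp only [String.reduceBEq, beq_self_eq_true, Bool.true_and, Bool.false_and, Bool.or_false,
    Bool.false_or]
  cases h1 : keywords.any (fun kw => PySem.Str.isIn "proces" (PySem.Str.lower kw) || PySem.Str.isIn "procedure" (PySem.Str.lower kw)) <;>
  cases h2 : keywords.any (fun kw => PySem.Str.isIn "systeem" (PySem.Str.lower kw) || PySem.Str.isIn "digitaal" (PySem.Str.lower kw)) <;>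
  cases h3 : keywords.any (fun kw => PySem.Str.isIn "wet" (PySem.Str.lower kw) || PySem.Str.isIn "juridisch" (PySem.Str.lower kw)) <;>
  cases h4 : keywords.any (fun kw => PySem.Str.isIn "beveiliging" (PySem.Str.lower kw) || PySem.Str.isIn "veiligheid" (PySem.Str.lower kw)) <;>
  simp [h1, h2, h3, h4]
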